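-- pv_equiv track=rewrite | github.com/steveogborne/advent-of-code | 2023/02/solver2.py | colour_min
-- ===== SOURCE A (Python) =====
-- def colour_min(game):
--     min_blue = 0 # initialise
--     min_red = 0 # initialise
--     min_green = 0 # initialise
--     for set in game:
--         for draw in set:
--             if draw[1] == "blue" and draw[0] > min_blue: min_blue = draw[0]
--             elif draw[1] == "red" and draw[0] > min_red: min_red = draw[0]
--             elif draw[1] == "green" and draw[0] > min_green: min_green = draw[0]
--     return(min_blue,min_red,min_green)
-- ===== SOURCE B (Python) =====
-- def colour_min(game):
--     draws = [d for s in game for d in s]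
--     min_blue = max([0] + [d[0] for d in draws if d[1] == "blue"])
--     min_red = max([0] + [d[0] for d in draws if d[1] == "red"])
--     min_green = max([0] + [d[0] for d in draws if d[1] == "green"])
--     return (min_blue, min_red, min_green)
-- ===== Notes on version B (the rewrite author's own statement) =====
-- stated objective: idiomatic
-- what changed: Replaces the single nested-loop branching accumulator with flattening all draws once and computing each colour's maximum as an independent filtered reduction seeded with 0.
import Mathlib
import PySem

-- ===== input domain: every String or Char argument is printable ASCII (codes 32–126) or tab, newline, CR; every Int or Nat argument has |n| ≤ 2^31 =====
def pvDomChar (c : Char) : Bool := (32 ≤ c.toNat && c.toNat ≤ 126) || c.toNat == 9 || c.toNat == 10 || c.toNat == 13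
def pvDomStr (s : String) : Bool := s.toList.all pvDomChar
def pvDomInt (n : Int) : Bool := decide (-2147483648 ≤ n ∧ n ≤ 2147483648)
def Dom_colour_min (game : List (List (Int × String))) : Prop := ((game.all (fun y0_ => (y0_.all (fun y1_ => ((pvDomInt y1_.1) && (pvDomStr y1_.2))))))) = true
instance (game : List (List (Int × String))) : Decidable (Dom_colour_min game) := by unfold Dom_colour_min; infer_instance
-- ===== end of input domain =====

-- B replaces A's single branching-accumulator pass with a flatten plus three independent colour-filtered max reductions (idiomatic decomposition; same cost).

-- ===== PORT A =====
-- one draw updates the (blue, red, green) accumulator exactly as A's if/elif chain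
def pvStepA (st : Int × Int × Int) (draw : Int × String) : Int × Int × Int :=
  if draw.2 = "blue" ∧ draw.1 > st.1 then (draw.1, st.2.1, st.2.2)
  else if draw.2 = "red" ∧ draw.1 > st.2.1 then (st.1, draw.1, st.2.2)
  else if draw.2 = "green" ∧ draw.1 > st.2.2 then (st.1, st.2.1, draw.1)
  else st

def colour_min (game : List (List (Int × String))) : Int × Int × Int :=
  game.foldl (fun st s => s.foldl pvStepA st) ((0 : Int), (0 : Int), (0 : Int))

-- ===== PORT B =====
-- max([0] + [d[0] for d in draws if d[1] == c]) as a max-fold seeded with 0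
def pvColourMax (draws : List (Int × String)) (c : String) : Int :=
  ((draws.filter (fun d => d.2 == c)).map Prod.fst).foldl max 0

def colour_min_alt (game : List (List (Int × String))) : Int × Int × Int :=
  let draws := game.flatMap id
  (pvColourMax draws "blue", pvColourMax draws "red", pvColourMax draws "green")

-- ===== PRECONDITION & SPEC =====
def Spec_colour_min (game : List (List (Int × String))) (out : Int × Int × Int) : Prop := out = colour_min_alt game
instance (game : List (List (Int × String))) (out : Int × Int × Int) : Decidable (Spec_colour_min game out) := by unfold Spec_colour_min; infer_instance

-- ===== CLAIM (what is proved, stated in full; the proofs are below) =====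
def Claim_equal_colour_min : Prop := ∀ (game : List (List (Int × String))), Dom_colour_min game → Spec_colour_min game (colour_min game)

-- ===== LEMMAS AND PROOFS =====

lemma inner_fold (l : List (Int × String)) (s : Int × Int × Int) :
    l.foldl pvStepA s =
      (((l.filter (fun d => d.2 == "blue")).map Prod.fst).foldl max s.1,
       ((l.filter (fun d => d.2 == "red")).map Prod.fst).foldl max s.2.1,
       ((l.filter (fun d => d.2 == "green")).map Prod.fst).foldl max s.2.2) := by
  induction l generalizing s with
  | nil => simp
  | cons d t ih =>
    obtain ⟨n, c⟩ := d
    simp only [List.foldl_cons, ih, pvStepA, List.filter_cons]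
    by_cases hb : c = "blue"
    · subst hb
      by_cases h : n > s.1
      · simp [h, show max s.1 n = n from by omega]
      · simp [h, show max s.1 n = s.1 from by omega]
    · by_cases hr : c = "red"
      · subst hr
        by_cases h : n > s.2.1
        · simp [h, show max s.2.1 n = n from by omega]
        · simp [h, show max s.2.1 n = s.2.1 from by omega]
      · by_cases hg : c = "green"
        · subst hg
          by_cases h : n > s.2.2
          · simp [h, show max s.2.2 n = n from by omega]
          · simp [h, show max s.2.2 n = s.2.2 from by omega]
        · simp [hb, hr, hg]

lemma outer_fold (game : List (List (Int × String))) (s : Int × Int × Int) :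
    game.foldl (fun st l => l.foldl pvStepA st) s =
      ((((game.flatMap id).filter (fun d => d.2 == "blue")).map Prod.fst).foldl max s.1,
       (((game.flatMap id).filter (fun d => d.2 == "red")).map Prod.fst).foldl max s.2.1,
       (((game.flatMap id).filter (fun d => d.2 == "green")).map Prod.fst).foldl max s.2.2) := by
  induction game generalizing s with
  | nil => simp
  | cons l t ih =>
    rw [List.foldl_cons, ih, inner_fold]
    simp [List.filter_append]

-- ===== VERDICT (by name: the statement is the Claim_ definition above) =====
theorem colour_min_spec : Claim_equal_colour_min := by
  intro game _
  unfold Spec_colour_min colour_min colour_min_alt pvColourMax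
  simp [outer_fold]
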